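-- pv_equiv track=rewrite | github.com/tcteo/advent-of-code-2021 | day12/day12part2.py | fails_small_cave_constraint
-- ===== SOURCE A (Python) =====
-- import collections
--
-- def is_small(cave_name):
--   return cave_name.lower() == cave_name
--
-- def fails_small_cave_constraint(path, nextname):
--   smallnames = [p for p in path if is_small(p)]
--   counts = collections.defaultdict(int)
--   for n in smallnames:
--     counts[n] += 1
--   counts[nextname] += 1
--
--   # sort counts in descending order
--   cv = list(sorted(counts.values(), key=lambda x:-x))
--
--   if len(cv)==0:
--     return False
--
--   # at least 1 element
--   if cv[0] > 2:
--     return True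
--   if cv[0] < 2:
--     return False
--
--   # cv[0] == 2
--   if len(cv)==1:
--     return False
--
--   # at least 2 elements
--   if cv[1] <= 1:
--     return False
--
--   return True
-- ===== SOURCE B (Python) =====
-- import collections
--
-- def is_small(cave_name):
--   return cave_name.lower() == cave_name
--
-- def fails_small_cave_constraint(path, nextname):
--   counts = collections.Counter(p for p in path if is_small(p))
--   counts[nextname] += 1
--   doubles = 0
--   for v in counts.values():
--     if v > 2:
--       return True
--     if v == 2:
--       doubles += 1
--   return doubles >= 2
-- ===== Notes on version B (the rewrite author's own statement) =====
-- stated objective: simpler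
-- what changed: B replaces the sort-descending-then-inspect-cv[0]/cv[1] decision with a single linear pass over the counts: return True on any count > 2, otherwise count how many values equal 2 and return doubles >= 2.
import Mathlib
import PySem

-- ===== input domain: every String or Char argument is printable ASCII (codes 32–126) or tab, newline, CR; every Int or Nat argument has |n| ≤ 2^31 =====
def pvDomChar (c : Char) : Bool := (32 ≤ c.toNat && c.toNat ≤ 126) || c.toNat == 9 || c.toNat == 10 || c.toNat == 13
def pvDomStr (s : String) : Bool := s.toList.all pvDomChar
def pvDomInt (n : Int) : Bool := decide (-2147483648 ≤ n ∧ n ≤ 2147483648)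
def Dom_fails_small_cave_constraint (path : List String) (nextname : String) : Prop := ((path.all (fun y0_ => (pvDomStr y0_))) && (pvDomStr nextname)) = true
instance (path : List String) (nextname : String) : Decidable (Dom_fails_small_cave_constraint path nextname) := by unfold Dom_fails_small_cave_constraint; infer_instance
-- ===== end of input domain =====

-- B decides the constraint in one linear pass over the counts (no sort): any count > 2 fails,
-- otherwise it fails iff at least two counts equal 2.  Objective: simpler.

-- ===== PORT A =====
def is_small (cave_name : String) : Bool := PySem.Str.lower cave_name == cave_name

-- A's tail of early-return checks on the descending-sorted value list cv
def pvDecideA (cv : List Int) : Bool :=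
  match cv with
  | [] => false
  | c0 :: rest =>
    if c0 > 2 then true
    else if c0 < 2 then false
    else
      match rest with
      | [] => false
      | c1 :: _ => if c1 ≤ 1 then false else true

def fails_small_cave_constraint (path : List String) (nextname : String) : Bool :=
  let smallnames := path.filter (fun p => is_small p)
  let counts := smallnames.foldl (fun d n => d.modify n 0 (· + 1)) (PySem.Dict.empty : PySem.Dict String Int)
  let counts := counts.modify nextname 0 (· + 1)
  let cv := PySem.List.sorted counts.values (fun x => -x) false
  pvDecideA cv

-- ===== PORT B =====
-- the for-loop of Source B with early return, carrying the `doubles` accumulator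
def pvLoopB (vs : List Int) (doubles : Int) : Bool :=
  match vs with
  | [] => doubles ≥ 2
  | v :: rest =>
    if v > 2 then true
    else pvLoopB rest (if v == 2 then doubles + 1 else doubles)

def fails_small_cave_constraint_alt (path : List String) (nextname : String) : Bool :=
  let counts := PySem.Dict.counter (path.filter (fun p => is_small p))
  let counts := counts.modify nextname 0 (· + 1)
  pvLoopB counts.values 0

-- ===== PRECONDITION & SPEC =====
def Spec_fails_small_cave_constraint (path : List String) (nextname : String) (out : Bool) : Prop := out = fails_small_cave_constraint_alt path nextname
instance (path : List String) (nextname : String) (out : Bool) : Decidable (Spec_fails_small_cave_constraint path nextname out) := by unfold Spec_fails_small_cave_constraint; infer_instance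

-- ===== CLAIM (what is proved, stated in full; the proofs are below) =====
def Claim_equal_fails_small_cave_constraint : Prop := ∀ (path : List String) (nextname : String), Dom_fails_small_cave_constraint path nextname → Spec_fails_small_cave_constraint path nextname (fails_small_cave_constraint path nextname)

-- ===== LEMMAS AND PROOFS =====

-- B's loop computes: some value exceeds 2, or (doubles + #values equal 2) ≥ 2
theorem pvLoopB_char (vs : List Int) (d : Int) :
    pvLoopB vs d = (vs.any (fun v => decide (2 < v)) || decide (2 ≤ d + (vs.countP (fun v => decide (v = 2)) : Int))) := by
  induction vs generalizing d with
  | nil => simp [pvLoopB]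
  | cons v rest ih =>
    by_cases h2 : 2 < v
    · simp [pvLoopB, h2]
    · by_cases he : v = 2
      · have harith : ∀ c : Nat, (2 ≤ d + 1 + (c : Int)) ↔ (2 ≤ d + ((c : Int) + 1)) := by
          intro c; omega
        simp [pvLoopB, he, ih, harith]
      · simp [pvLoopB, h2, he, ih]

-- A's early-return chain on a descending list computes the same predicate
theorem pvDecideA_char (cv : List Int) (hp : cv.Pairwise (fun a b => b ≤ a)) :
    pvDecideA cv = (cv.any (fun v => decide (2 < v)) || decide (2 ≤ (cv.countP (fun v => decide (v = 2)) : Int))) := by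
  match cv with
  | [] => simp [pvDecideA]
  | c0 :: rest =>
    have h0 : ∀ y ∈ rest, y ≤ c0 := (List.pairwise_cons.mp hp).1
    by_cases hgt : 2 < c0
    · simp [pvDecideA, hgt]
    · by_cases hlt : c0 < 2
      · have hnone : ∀ y ∈ c0 :: rest, y < 2 := by
          intro y hy
          rcases List.mem_cons.mp hy with rfl | hy
          · exact hlt
          · exact lt_of_le_of_lt (h0 _ hy) hlt
        have hany : (c0 :: rest).any (fun v => decide (2 < v)) = false := by
          simp only [List.any_eq_false, decide_eq_true_eq]
          intro y hy; have := hnone y hy; omega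
        have hcnt : (c0 :: rest).countP (fun v => decide (v = 2)) = 0 := by
          rw [List.countP_eq_zero]
          intro y hy; have := hnone y hy; simp; omega
        simp [pvDecideA, hgt, hlt, hany, hcnt]
      · have hc0 : c0 = 2 := by omega
        subst hc0
        match rest with
        | [] => simp [pvDecideA]
        | c1 :: rest2 =>
          have h1 : ∀ y ∈ rest2, y ≤ c1 := (List.pairwise_cons.mp (List.pairwise_cons.mp hp).2).1
          by_cases hle : c1 ≤ 1
          · have hany : (2 :: c1 :: rest2).any (fun v => decide (2 < v)) = false := by
              simp only [List.any_eq_false, decide_eq_true_eq]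
              intro y hy
              rcases List.mem_cons.mp hy with rfl | hy
              · omega
              · rcases List.mem_cons.mp hy with rfl | hy
                · omega
                · have := h1 _ hy; omega
            have hcnt : (c1 :: rest2).countP (fun v => decide (v = 2)) = 0 := by
              rw [List.countP_eq_zero]
              intro y hy
              rcases List.mem_cons.mp hy with rfl | hy
              · simp; omega
              · have := h1 _ hy; simp; omega
            have hlhs : pvDecideA (2 :: c1 :: rest2) = false := by
              simp [pvDecideA, hle]
            rw [hlhs, hany, List.countP_cons, hcnt]
            norm_num
          · have hc1 : c1 = 2 := by
              have := h0 c1 (by simp); omega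
            subst hc1
            have hlhs : pvDecideA (2 :: 2 :: rest2) = true := by
              simp [pvDecideA]
            rw [hlhs, List.countP_cons, List.countP_cons]
            simp
            right
            omega

-- Bool.any is invariant under permutation
theorem pvAny_perm {l l' : List Int} (h : l.Perm l') (p : Int → Bool) : l.any p = l'.any p := by
  cases hl : l.any p with
  | true =>
    obtain ⟨x, hx, hpx⟩ := List.any_eq_true.mp hl
    exact (List.any_eq_true.mpr ⟨x, h.mem_iff.mp hx, hpx⟩).symm
  | false =>
    rw [eq_comm, List.any_eq_false]
    intro x hx
    exact (List.any_eq_false.mp hl) x (h.mem_iff.mpr hx)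

-- ===== VERDICT (by name: the statement is the Claim_ definition above) =====
theorem fails_small_cave_constraint_spec : Claim_equal_fails_small_cave_constraint := by
  intro path nextname _
  unfold Spec_fails_small_cave_constraint fails_small_cave_constraint fails_small_cave_constraint_alt
  simp only
  rw [PySem.Dict.counter_eq_foldl]
  set counts := ((path.filter (fun p => is_small p)).foldl (fun d n => d.modify n 0 (· + 1)) (PySem.Dict.empty : PySem.Dict String Int)).modify nextname 0 (· + 1) with hc
  have hperm : (PySem.List.sorted counts.values (fun x => -x) false).Perm counts.values :=
    PySem.List.sorted_perm _ _ _
  have hpair : (PySem.List.sorted counts.values (fun x => -x) false).Pairwise (fun a b => b ≤ a) := by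
    have := PySem.List.sorted_pairwise counts.values (fun x => -x)
    exact this.imp (by intro a b h; omega)
  rw [pvDecideA_char _ hpair, pvLoopB_char]
  rw [hperm.countP_eq, pvAny_perm hperm]
  norm_num
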